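-- pv_equiv track=rewrite | github.com/zemdenalex/tula-25-12-1 | ml/groq_tts.py | simple_segment_text
-- ===== SOURCE A (Python) =====
-- def simple_segment_text(text: str, max_length: int = 200) -> list[str]:
--     """Simple text segmentation function for TTS"""
--     if not text.strip():
--         return []
--
--     # Разбиваем по предложениям
--     sentences = []
--     current = ""
--
--     for char in text:
--         current += char
--         if char in '.!?\n':
--             sentences.append(current.strip())
--             current = ""
--
--     if current.strip():
--         sentences.append(current.strip())
--
--     # Объединяем короткие предложения
--     segments = []
--     current_segment = ""
--
--     for sentence in sentences:
--         if len(current_segment + " " + sentence) <= max_length: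
--             current_segment += (" " + sentence if current_segment else sentence)
--         else:
--             if current_segment:
--                 segments.append(current_segment)
--             current_segment = sentence
--
--     if current_segment:
--         segments.append(current_segment)
--
--     return [seg for seg in segments if seg.strip()]
-- ===== SOURCE B (Python) =====
-- def simple_segment_text(text: str, max_length: int = 200) -> list[str]:
--     """Simple text segmentation function for TTS"""
--     # Split at delimiter positions by slicing instead of char-by-char accumulation.
--     sentences = []
--     start = 0
--     for i, ch in enumerate(text):
--         if ch in '.!?\n':
--             sentences.append(text[start:i + 1].strip())
--             start = i + 1
--     tail = text[start:].strip()
--     if tail: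
--         sentences.append(tail)
--
--     # Greedy merge tracking pieces and the running joined length; join once per segment.
--     segments = []
--     parts = []
--     cur_len = 0  # == len(" ".join(parts)); 0 iff the current segment is empty
--     for s in sentences:
--         if cur_len + 1 + len(s) <= max_length:
--             if cur_len == 0:
--                 parts = [s]
--                 cur_len = len(s)
--             else:
--                 parts.append(s)
--                 cur_len += 1 + len(s)
--         else:
--             if cur_len > 0:
--                 segments.append(" ".join(parts))
--             parts = [s]
--             cur_len = len(s)
--     if cur_len > 0:
--         segments.append(" ".join(parts))
--     return segments
-- ===== Notes on version B (the rewrite author's own statement) =====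
-- stated objective: alternative
-- what changed: B splits the text by recording delimiter indices and slicing instead of accumulating a chunk char-by-char, and the greedy merge keeps a list of sentence pieces with a running joined length (joining once per emitted segment) instead of repeated string concatenation, which also makes A's trailing empty-segment filter unnecessary.
import Mathlib
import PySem

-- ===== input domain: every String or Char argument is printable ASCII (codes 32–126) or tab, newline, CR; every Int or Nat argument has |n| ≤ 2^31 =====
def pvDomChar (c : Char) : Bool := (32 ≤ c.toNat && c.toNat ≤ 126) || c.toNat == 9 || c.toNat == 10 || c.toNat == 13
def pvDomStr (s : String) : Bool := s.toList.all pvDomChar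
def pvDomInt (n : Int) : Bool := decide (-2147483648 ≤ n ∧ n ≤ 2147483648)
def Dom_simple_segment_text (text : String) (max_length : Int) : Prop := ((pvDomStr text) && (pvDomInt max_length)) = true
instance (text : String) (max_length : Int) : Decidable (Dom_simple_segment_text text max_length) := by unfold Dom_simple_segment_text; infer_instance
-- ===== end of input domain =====

-- B replaces A's char-by-char chunk accumulation with index-based slicing and joins each
-- merged segment once from its pieces (tracking the joined length) instead of repeated
-- string concatenation; objective: alternative decomposition, same observable result.

-- ===== PORT A =====
def pvDelim (c : Char) : Bool := c == '.' || c == '!' || c == '?' || c == '\n'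

def pvStepA (st : List (List Char) × List Char) (ch : Char) : List (List Char) × List Char :=
  let cur := st.2 ++ [ch]
  if pvDelim ch then (st.1 ++ [PySem.Chars.strip cur], []) else (st.1, cur)

def pvMergeA (max_length : Int) (st : List (List Char) × List Char) (s : List Char) :
    List (List Char) × List Char :=
  if PySem.Chars.len (st.2 ++ [' '] ++ s) ≤ max_length then
    (st.1, if st.2 ≠ [] then st.2 ++ [' '] ++ s else s)
  else
    ((if st.2 ≠ [] then st.1 ++ [st.2] else st.1), s)

def simple_segment_text (text : String) (max_length : Int) : List String :=
  if PySem.Chars.strip text.toList = [] then []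
  else
    let p := text.toList.foldl pvStepA ([], [])
    let sentences := if PySem.Chars.strip p.2 ≠ [] then p.1 ++ [PySem.Chars.strip p.2] else p.1
    let q := sentences.foldl (pvMergeA max_length) ([], [])
    let segments := if q.2 ≠ [] then q.1 ++ [q.2] else q.1
    (segments.filter (fun seg => !(PySem.Chars.strip seg).isEmpty)).map String.ofList

-- ===== PORT B =====
def pvStepB (cs : List Char) (st : List (List Char) × Int) (ic : Int × Char) :
    List (List Char) × Int :=
  if pvDelim ic.2 then
    (st.1 ++ [PySem.Chars.strip (PySem.List.slice cs (some st.2) (some (ic.1 + 1)))], ic.1 + 1)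
  else st

def pvMergeB (max_length : Int) (st : List (List Char) × List (List Char) × Int) (s : List Char) :
    List (List Char) × List (List Char) × Int :=
  if st.2.2 + 1 + (s.length : Int) ≤ max_length then
    if st.2.2 = 0 then (st.1, [s], (s.length : Int))
    else (st.1, st.2.1 ++ [s], st.2.2 + 1 + (s.length : Int))
  else
    ((if 0 < st.2.2 then st.1 ++ [PySem.Chars.join [' '] st.2.1] else st.1), [s], (s.length : Int))

def simple_segment_text_alt (text : String) (max_length : Int) : List String :=
  let cs := text.toList
  let p := (PySem.List.enumerate cs).foldl (pvStepB cs) ([], 0)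
  let tail := PySem.Chars.strip (PySem.List.slice cs (some p.2) none)
  let sentences := if tail ≠ [] then p.1 ++ [tail] else p.1
  let q := sentences.foldl (pvMergeB max_length) ([], [], 0)
  let segments := if 0 < q.2.2 then q.1 ++ [PySem.Chars.join [' '] q.2.1] else q.1
  segments.map String.ofList

-- ===== PRECONDITION & SPEC =====
def Spec_simple_segment_text (text : String) (max_length : Int) (out : List String) : Prop := out = simple_segment_text_alt text max_length
instance (text : String) (max_length : Int) (out : List String) : Decidable (Spec_simple_segment_text text max_length out) := by unfold Spec_simple_segment_text; infer_instance

-- ===== CLAIM (what is proved, stated in full; the proofs are below) =====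
def Claim_equal_simple_segment_text : Prop := ∀ (text : String) (max_length : Int), Dom_simple_segment_text text max_length → Spec_simple_segment_text text max_length (simple_segment_text text max_length)

-- ===== LEMMAS AND PROOFS =====

-- strip is empty iff every character is whitespace
lemma pv_strip_eq_nil_iff (cs : List Char) :
    PySem.Chars.strip cs = [] ↔ ∀ c ∈ cs, PySem.Chars.isspace c = true := by
  simp [PySem.Chars.strip, PySem.Chars.lstrip, PySem.Chars.rstrip, List.dropWhile_eq_nil_iff]
  constructor
  · intro h c hc
    by_cases hd : c ∈ List.dropWhile PySem.Chars.isspace cs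
    · exact h c (by simpa using List.mem_reverse.2 hd)
    · have hsplit := List.takeWhile_append_dropWhile (p := PySem.Chars.isspace) (l := cs)
      rw [← hsplit] at hc
      rcases List.mem_append.1 hc with h1 | h2
      · exact List.mem_takeWhile_imp h1
      · exact absurd h2 hd
  · intro h c hc
    exact h c (List.dropWhile_sublist _ |>.subset (by simpa using hc))

-- the head of a nonempty strip is not whitespace
lemma pv_strip_head (cs : List Char) (c : Char) (r : List Char)
    (h : PySem.Chars.strip cs = c :: r) : PySem.Chars.isspace c = false := by
  unfold PySem.Chars.strip PySem.Chars.rstrip PySem.Chars.lstrip at h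
  set d := List.dropWhile PySem.Chars.isspace cs with hd
  have hpref : (List.dropWhile PySem.Chars.isspace d.reverse).reverse <+: d := by
    have : List.dropWhile PySem.Chars.isspace d.reverse <:+ d.reverse := List.dropWhile_suffix _
    simpa using this.reverse
  rw [h] at hpref
  obtain ⟨t, ht⟩ := hpref
  have hdd : d = c :: (r ++ t) := by simpa using ht.symm
  have hne : List.dropWhile PySem.Chars.isspace cs ≠ [] := by rw [← hd, hdd]; simp
  have h1 := List.head_dropWhile_not PySem.Chars.isspace (l := cs) hne
  have h2 : (List.dropWhile PySem.Chars.isspace cs).head? = some c := by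
    rw [← hd, hdd]; rfl
  rw [List.head?_eq_some_head hne] at h2
  rw [Option.some_inj.1 h2] at h1
  exact h1

-- a list with non-space head does not strip to empty
lemma pv_strip_cons_ne_nil (c : Char) (r : List Char) (hc : PySem.Chars.isspace c = false) :
    PySem.Chars.strip (c :: r) ≠ [] := by
  intro h
  have := (pv_strip_eq_nil_iff (c :: r)).1 h c (by simp)
  rw [hc] at this
  exact Bool.false_ne_true this

-- " ".join(parts ++ [s]) for nonempty parts
lemma pv_intercalate_snoc (sep s : List Char) (ps : List (List Char)) (h : ps ≠ []) :
    List.intercalate sep (ps ++ [s]) = List.intercalate sep ps ++ sep ++ s := by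
  induction ps with
  | nil => simp at h
  | cons a t ih =>
    cases t with
    | nil => simp [List.intercalate]
    | cons b u => simp [List.intercalate] at ih ⊢; simp [ih]

-- growing the current chunk by one character = widening the slice by one
lemma pv_take_snoc (cs : List Char) (k start : Nat) (c : Char) (t : List Char)
    (hk : cs.drop k = c :: t) (hs : start ≤ k) :
    (cs.drop start).take (k - start) ++ [c] = (cs.drop start).take (k + 1 - start) := by
  have hX : (cs.drop start).drop (k - start) = c :: t := by
    rw [List.drop_drop]
    rwa [show start + (k - start) = k by omega]
  calc (cs.drop start).take (k - start) ++ [c]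
      = (cs.drop start).take (k - start) ++ ((cs.drop start).drop (k - start)).take 1 := by
        rw [hX]; rfl
    _ = (cs.drop start).take (k + 1 - start) := by
        rw [← List.take_add]
        congr 1
        omega

-- the split loops of A and B compute the same sentence list and related residues
lemma pv_split_inv (cs : List Char) :
    ∀ (t : List Char) (k start : Nat) (acc : List (List Char)),
      cs.drop k = t → start ≤ k →
      ∃ e : Nat,
        (PySem.List.enumerate t (k : Int)).foldl (pvStepB cs) (acc, (start : Int)) =
          ((t.foldl pvStepA (acc, (cs.drop start).take (k - start))).1, (e : Int))
        ∧ (t.foldl pvStepA (acc, (cs.drop start).take (k - start))).2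
            = (cs.drop e).take (k + t.length - e) := by
  intro t
  induction t with
  | nil =>
    intro k start acc hk hs
    exact ⟨start, by simp [PySem.List.enumerate], by simp⟩
  | cons c t ih =>
    intro k start acc hk hs
    rw [PySem.List.enumerate_cons]
    have hsn : (cs.drop start).take (k - start) ++ [c] = (cs.drop start).take (k + 1 - start) :=
      pv_take_snoc cs k start c t hk hs
    have hk1 : cs.drop (k + 1) = t := by
      have := congrArg (List.drop 1) hk
      simpa [List.drop_drop, Nat.add_comm] using this
    by_cases hd : pvDelim c = true
    · have hslice : PySem.List.slice cs (some (start : Int)) (some ((k : Int) + 1)) =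
          (cs.drop start).take (k + 1 - start) := by
        have := PySem.List.slice_natCast cs start (k + 1)
        push_cast at this ⊢
        rw [this]
      simp only [List.foldl_cons, pvStepA, pvStepB, hd, if_true, hslice, hsn]
      rw [show ((k : Int) + 1) = ((k + 1 : Nat) : Int) by push_cast; ring]
      obtain ⟨e, h1, h2⟩ := ih (k+1) (k+1)
        (acc ++ [PySem.Chars.strip ((cs.drop start).take (k + 1 - start))]) hk1 (le_refl _)
      rw [show (cs.drop (k+1)).take ((k+1) - (k+1)) = ([] : List Char) by simp] at h1 h2
      refine ⟨e, h1, by rw [h2]; congr 1; simp only [List.length_cons]; omega⟩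
    · have hd' : pvDelim c = false := by simpa using hd
      simp only [List.foldl_cons, pvStepA, pvStepB, hd', Bool.false_eq_true, if_false, hsn]
      rw [show ((k : Int) + 1) = ((k + 1 : Nat) : Int) by push_cast; ring]
      obtain ⟨e, h1, h2⟩ := ih (k+1) start acc hk1 (by omega)
      refine ⟨e, h1, by rw [h2]; congr 1; simp only [List.length_cons]; omega⟩

-- every sentence A's split loop accumulates satisfies a property of strip-images
lemma pv_stepA_heads (P : List Char → Prop) (hP : ∀ x, P (PySem.Chars.strip x)) :
    ∀ (l : List Char) (st : List (List Char) × List Char),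
      (∀ s ∈ st.1, P s) → ∀ s ∈ (l.foldl pvStepA st).1, P s := by
  intro l
  induction l with
  | nil => intro st h; exact h
  | cons c t ih =>
    intro st h
    simp only [List.foldl_cons, pvStepA]
    by_cases hd : pvDelim c = true
    · rw [if_pos hd]
      refine ih _ ?_
      intro s hs
      rcases List.mem_append.1 hs with h1 | h1
      · exact h s h1
      · rw [show s = PySem.Chars.strip (st.2 ++ [c]) by simpa using h1]
        exact hP _
    · rw [if_neg hd]
      exact ih _ h

-- the merge loops of A and B agree: A's current segment is the join of B's pieces
lemma pv_merge_inv (maxL : Int) :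
    ∀ (sen : List (List Char)) (segs parts : List (List Char)),
      (∀ s ∈ sen, ∀ c r, s = c :: r → PySem.Chars.isspace c = false) →
      (∀ c r, List.intercalate [' '] parts = c :: r → PySem.Chars.isspace c = false) →
      (sen.foldl (pvMergeA maxL) (segs, List.intercalate [' '] parts)).1
          = (sen.foldl (pvMergeB maxL) (segs, parts, ((List.intercalate [' '] parts).length : Int))).1
      ∧ (sen.foldl (pvMergeA maxL) (segs, List.intercalate [' '] parts)).2
          = List.intercalate [' '] (sen.foldl (pvMergeB maxL) (segs, parts, ((List.intercalate [' '] parts).length : Int))).2.1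
      ∧ (sen.foldl (pvMergeB maxL) (segs, parts, ((List.intercalate [' '] parts).length : Int))).2.2
          = ((List.intercalate [' '] (sen.foldl (pvMergeB maxL) (segs, parts, ((List.intercalate [' '] parts).length : Int))).2.1).length : Int)
      ∧ (∀ c r, List.intercalate [' '] (sen.foldl (pvMergeB maxL) (segs, parts, ((List.intercalate [' '] parts).length : Int))).2.1 = c :: r → PySem.Chars.isspace c = false)
      ∧ ((∀ g ∈ segs, PySem.Chars.strip g ≠ []) →
          ∀ g ∈ (sen.foldl (pvMergeA maxL) (segs, List.intercalate [' '] parts)).1, PySem.Chars.strip g ≠ []) := by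
  intro sen
  induction sen with
  | nil =>
    intro segs parts hsen hpart
    exact ⟨rfl, rfl, rfl, hpart, fun h => h⟩
  | cons s sen ih =>
    intro segs parts hsen hpart
    have hs : ∀ c r, s = c :: r → PySem.Chars.isspace c = false := hsen s (by simp)
    have hsen' : ∀ x ∈ sen, ∀ c r, x = c :: r → PySem.Chars.isspace c = false :=
      fun x hx => hsen x (by simp [hx])
    set J := List.intercalate [' '] parts with hJ
    have hcond : PySem.Chars.len (J ++ [' '] ++ s) = (J.length : Int) + 1 + (s.length : Int) := by
      simp [PySem.Chars.len]; ring
    simp only [List.foldl_cons, pvMergeA, pvMergeB, hcond]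
    by_cases hle : (J.length : Int) + 1 + (s.length : Int) ≤ maxL
    · rw [if_pos hle, if_pos hle]
      by_cases hnil : J = []
      · have hz : (J.length : Int) = 0 := by simp [hnil]
        rw [if_neg (by simp [hnil]), hz, if_pos rfl]
        have h1 : s = List.intercalate [' '] [s] := by simp [List.intercalate]
        have := ih segs [s] hsen' (by intro c r hc; exact hs c r (by rwa [← h1] at hc))
        rw [← h1] at this
        simpa using this
      · have hpne : parts ≠ [] := by
          intro h; rw [hJ, h] at hnil; simp [List.intercalate] at hnil
        have hsnoc : List.intercalate [' '] (parts ++ [s]) = J ++ [' '] ++ s := by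
          rw [pv_intercalate_snoc _ _ _ hpne, hJ]
        have hhead : ∀ c r, J ++ [' '] ++ s = c :: r → PySem.Chars.isspace c = false := by
          intro c r hc
          cases hJc : J with
          | nil => rw [hJc] at hnil; exact absurd rfl hnil
          | cons a b =>
            rw [hJc] at hc
            have hac : a = c := by simpa using congrArg List.head? hc
            exact hac ▸ hpart a b hJc
        rw [if_pos hnil, if_neg (by simpa using hnil)]
        have := ih segs (parts ++ [s]) hsen' (by rw [hsnoc]; exact hhead)
        rw [hsnoc] at this
        have hlen : ((J ++ [' '] ++ s).length : Int) = (J.length : Int) + 1 + (s.length : Int) := by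
          simp; ring
        rw [hlen] at this
        exact this
    · rw [if_neg hle, if_neg hle]
      have hcnd : (J ≠ []) ↔ (0 < (J.length : Int)) := by
        cases J <;> simp
      have h1 : s = List.intercalate [' '] [s] := by simp [List.intercalate]
      have hjoin : PySem.Chars.join [' '] parts = J := by simp [PySem.Chars.join, hJ]
      have hrest := ih (if J ≠ [] then segs ++ [J] else segs) [s] hsen'
        (by intro c r hc; exact hs c r (by rwa [← h1] at hc))
      rw [← h1] at hrest
      have hsegseq : (if 0 < (J.length : Int) then segs ++ [PySem.Chars.join [' '] parts] else segs)
          = (if J ≠ [] then segs ++ [J] else segs) := by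
        rw [hjoin]; by_cases hnil : J = [] <;> simp [hnil, hcnd]
      rw [hsegseq]
      refine ⟨hrest.1, hrest.2.1, hrest.2.2.1, hrest.2.2.2.1, ?_⟩
      intro hsegs
      refine hrest.2.2.2.2 ?_
      intro g hg
      by_cases hnil : J = []
      · rw [if_neg (by simp [hnil])] at hg
        exact hsegs g hg
      · rw [if_pos hnil] at hg
        rcases List.mem_append.1 hg with h' | h'
        · exact hsegs g h'
        · have hgJ : g = J := by simpa using h'
          cases hJ' : J with
          | nil => exact absurd hJ' hnil
          | cons a b =>
            rw [hgJ, hJ']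
            exact pv_strip_cons_ne_nil a b (hpart a b hJ')

-- whitespace-only text: B's split loop only accumulates empty sentences
lemma pv_stepB_allnil (cs : List Char) (hall : ∀ c ∈ cs, PySem.Chars.isspace c = true) :
    ∀ (l : List (Int × Char)) (st : List (List Char) × Int),
      (∀ g ∈ st.1, g = ([] : List Char)) →
      ∀ g ∈ (l.foldl (pvStepB cs) st).1, g = ([] : List Char) := by
  intro l
  induction l with
  | nil => intro st h; exact h
  | cons ic t ih =>
    intro st h
    simp only [List.foldl_cons, pvStepB]
    by_cases hd : pvDelim ic.2 = true
    · rw [if_pos hd]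
      refine ih _ ?_
      intro g hg
      rcases List.mem_append.1 hg with h1 | h1
      · exact h g h1
      · rw [show g = PySem.Chars.strip (PySem.List.slice cs (some st.2) (some (ic.1 + 1))) by
            simpa using h1]
        exact (pv_strip_eq_nil_iff _).2
          (fun c hc => hall c (PySem.List.mem_of_mem_slice cs _ _ hc))
    · rw [if_neg hd]
      exact ih _ h

-- merging only empty sentences yields no segments
lemma pv_mergeB_allnil (maxL : Int) :
    ∀ (sen : List (List Char)), (∀ s ∈ sen, s = ([] : List Char)) →
      ∀ (parts : List (List Char)),
      (sen.foldl (pvMergeB maxL) ([], parts, 0)).1 = []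
      ∧ (sen.foldl (pvMergeB maxL) ([], parts, 0)).2.2 = 0 := by
  intro sen
  induction sen with
  | nil => intro h parts; exact ⟨rfl, rfl⟩
  | cons s t ih =>
    intro h parts
    have hs : s = [] := h s (by simp)
    have ht : ∀ x ∈ t, x = ([] : List Char) := fun x hx => h x (by simp [hx])
    subst hs
    simp only [List.foldl_cons, pvMergeB, List.length_nil, Nat.cast_zero]
    split_ifs with h1 h2
    · exact ih ht [[]]
    · exact absurd h2 (by omega)
    · exact ih ht [[]]

-- ===== VERDICT (by name: the statement is the Claim_ definition above) =====
theorem simple_segment_text_spec : Claim_equal_simple_segment_text := by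
  intro text maxL _hdom
  unfold Spec_simple_segment_text
  simp only [simple_segment_text, simple_segment_text_alt]
  set cs := text.toList with hcs
  by_cases hguard : PySem.Chars.strip cs = []
  · -- whitespace-only text: A returns [] by its guard, B computes []
    rw [if_pos hguard]
    have hall : ∀ c ∈ cs, PySem.Chars.isspace c = true := (pv_strip_eq_nil_iff cs).1 hguard
    have hsent : ∀ g ∈ ((PySem.List.enumerate cs).foldl (pvStepB cs) ([], 0)).1, g = ([] : List Char) :=
      pv_stepB_allnil cs hall _ _ (by intro g hg; simp at hg)
    have htail : PySem.Chars.strip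
        (PySem.List.slice cs (some ((PySem.List.enumerate cs).foldl (pvStepB cs) ([], 0)).2) none) = [] :=
      (pv_strip_eq_nil_iff _).2 (fun c hc => hall c (PySem.List.mem_of_mem_slice cs _ _ hc))
    rw [htail]
    simp only [ne_eq, not_true_eq_false, if_false]
    obtain ⟨h1, h2⟩ := pv_mergeB_allnil maxL _ hsent []
    rw [h2]
    simp [h1]
  · rw [if_neg hguard]
    -- the two split phases agree
    obtain ⟨e, hB, hA2⟩ := pv_split_inv cs cs 0 0 [] (by simp) (le_refl 0)
    have h00 : (cs.drop 0).take (0 - 0) = ([] : List Char) := by simp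
    rw [h00] at hB hA2
    rw [Nat.cast_zero] at hB
    have hdropA : (cs.foldl pvStepA ([], [])).2 = cs.drop e := by
      rw [hA2]
      refine List.take_of_length_le ?_
      simp
    have hBstart : ((PySem.List.enumerate cs).foldl (pvStepB cs) ([], 0)).2 = (e : Int) := by
      rw [hB]
    have hBacc : ((PySem.List.enumerate cs).foldl (pvStepB cs) ([], 0)).1
        = (cs.foldl pvStepA ([], [])).1 := by
      rw [hB]
    have htaileq : PySem.List.slice cs
        (some ((PySem.List.enumerate cs).foldl (pvStepB cs) ([], 0)).2) none
        = (cs.foldl pvStepA ([], [])).2 := by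
      rw [hBstart, PySem.List.slice_from cs (by positivity), hdropA]
      simp
    -- the sentence lists coincide
    set sentences := (if PySem.Chars.strip (cs.foldl pvStepA ([], [])).2 ≠ []
      then (cs.foldl pvStepA ([], [])).1 ++ [PySem.Chars.strip (cs.foldl pvStepA ([], [])).2]
      else (cs.foldl pvStepA ([], [])).1) with hsent
    have hsentB : (if PySem.Chars.strip (PySem.List.slice cs
          (some ((PySem.List.enumerate cs).foldl (pvStepB cs) ([], 0)).2) none) ≠ []
        then ((PySem.List.enumerate cs).foldl (pvStepB cs) ([], 0)).1
          ++ [PySem.Chars.strip (PySem.List.slice cs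
              (some ((PySem.List.enumerate cs).foldl (pvStepB cs) ([], 0)).2) none)]
        else ((PySem.List.enumerate cs).foldl (pvStepB cs) ([], 0)).1) = sentences := by
      rw [htaileq, hBacc, hsent]
    rw [hsentB]
    -- every sentence is a strip-image: heads are not whitespace
    have hheads : ∀ s ∈ sentences, ∀ c r, s = c :: r → PySem.Chars.isspace c = false := by
      have hacc : ∀ s ∈ (cs.foldl pvStepA ([], [])).1, ∀ c r, s = c :: r → PySem.Chars.isspace c = false := by
        refine pv_stepA_heads (fun x => ∀ c r, x = c :: r → PySem.Chars.isspace c = false) ?_ cs ([], []) ?_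
        · intro x c r hx
          exact pv_strip_head x c r hx
        · intro s hsx; simp at hsx
      intro s hsx
      rw [hsent] at hsx
      by_cases hne : PySem.Chars.strip (cs.foldl pvStepA ([], [])).2 ≠ []
      · rw [if_pos hne] at hsx
        rcases List.mem_append.1 hsx with h1 | h1
        · exact hacc s h1
        · intro c r hc
          have hseq : s = PySem.Chars.strip (cs.foldl pvStepA ([], [])).2 := by simpa using h1
          exact pv_strip_head _ c r (by rw [← hseq]; exact hc)
      · rw [if_neg hne] at hsx
        exact hacc s hsx
    -- the merge phases agree
    have hinit : List.intercalate [' '] ([] : List (List Char)) = ([] : List Char) := by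
      simp [List.intercalate]
    obtain ⟨m1, m2, m3, _m4, m5⟩ := pv_merge_inv maxL sentences [] [] hheads
      (by rw [hinit]; intro c r hc; exact absurd hc (by simp))
    simp only [hinit, List.length_nil, Nat.cast_zero] at m1 m2 m3 _m4 m5
    set qA := sentences.foldl (pvMergeA maxL) ([], []) with hqA
    set qB := sentences.foldl (pvMergeB maxL) ([], [], 0) with hqB
    -- final segment flush
    have hflush : (if qA.2 ≠ [] then qA.1 ++ [qA.2] else qA.1)
        = (if 0 < qB.2.2 then qB.1 ++ [PySem.Chars.join [' '] qB.2.1] else qB.1) := by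
      rw [m3]
      by_cases hnil : List.intercalate [' '] qB.2.1 = []
      · rw [if_neg (by rw [m2, hnil]; simp), if_neg (by rw [hnil]; simp)]
        exact m1
      · rw [if_pos (by rw [m2]; exact hnil), if_pos (by
          cases hx : List.intercalate [' '] qB.2.1 with
          | nil => exact absurd hx hnil
          | cons _a _b => simp)]
        rw [m1, m2]
        simp [PySem.Chars.join]
    rw [← hflush]
    -- the filter keeps everything
    have hkeep : ∀ g ∈ (if qA.2 ≠ [] then qA.1 ++ [qA.2] else qA.1), PySem.Chars.strip g ≠ [] := by
      intro g hg
      by_cases hnil : qA.2 ≠ []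
      · rw [if_pos hnil] at hg
        rcases List.mem_append.1 hg with h1 | h1
        · exact m5 (by intro x hx; simp at hx) g h1
        · have hgq : g = qA.2 := by simpa using h1
          cases hx : qA.2 with
          | nil => exact absurd hx hnil
          | cons a b =>
            rw [hgq, hx]
            refine pv_strip_cons_ne_nil a b ?_
            have := _m4 a b (by rw [← m2]; exact hx)
            exact this
      · rw [if_neg hnil] at hg
        exact m5 (by intro x hx; simp at hx) g hg
    have hfilter : (if qA.2 ≠ [] then qA.1 ++ [qA.2] else qA.1).filter
        (fun seg => !(PySem.Chars.strip seg).isEmpty)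
        = (if qA.2 ≠ [] then qA.1 ++ [qA.2] else qA.1) := by
      refine List.filter_eq_self.2 ?_
      intro g hg
      have := hkeep g hg
      simpa [List.isEmpty_iff] using this
    rw [hfilter]
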